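-- pv_equiv track=rewrite | github.com/maxcarriere/lectura-modules | TTS-Diphone/src/lectura_tts_diphone/engine.py | build_diphone_chain
-- ===== SOURCE A (Python) =====
-- def build_diphone_chain(phones: list[str]) -> list[str]:
--     """Build diphone key chain: ['b','a'] → ['#-b', 'b-a', 'a-#']."""
--     if not phones:
--         return []
--     chain = [f"#-{phones[0]}"]
--     for i in range(len(phones) - 1):
--         chain.append(f"{phones[i]}-{phones[i+1]}")
--     chain.append(f"{phones[-1]}-#")
--     return chain
-- ===== SOURCE B (Python) =====
-- def build_diphone_chain(phones: list[str]) -> list[str]: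
--     """Build diphone key chain: ['b','a'] → ['#-b', 'b-a', 'a-#']."""
--     if not phones:
--         return []
--     chain = []
--     nxt = "#"
--     for p in reversed(phones):
--         chain.append(f"{p}-{nxt}")
--         nxt = p
--     chain.append(f"#-{nxt}")
--     chain.reverse()
--     return chain
-- ===== Notes on version B (the rewrite author's own statement) =====
-- stated objective: alternative
-- what changed: Builds the chain back-to-front: a single reversed traversal threads the successor phone as an accumulator (no index arithmetic, no head/tail endpoint appends) and the result is reversed at the end.
import Mathlib
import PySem

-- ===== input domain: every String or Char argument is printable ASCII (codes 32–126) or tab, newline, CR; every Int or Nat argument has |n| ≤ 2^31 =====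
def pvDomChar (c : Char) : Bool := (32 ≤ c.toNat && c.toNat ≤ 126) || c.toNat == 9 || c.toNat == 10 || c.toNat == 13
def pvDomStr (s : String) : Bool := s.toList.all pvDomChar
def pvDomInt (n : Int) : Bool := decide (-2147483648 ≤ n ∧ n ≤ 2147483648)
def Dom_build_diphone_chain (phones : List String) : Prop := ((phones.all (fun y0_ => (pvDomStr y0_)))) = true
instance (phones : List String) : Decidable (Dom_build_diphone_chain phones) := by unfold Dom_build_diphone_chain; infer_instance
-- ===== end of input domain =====

-- B builds the chain back-to-front: one reversed traversal threading the successor phone as an accumulator, then a final reverse (alternative decomposition; same O(n) cost).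

-- ===== PORT A =====
-- indexed accesses phones[i], phones[i+1], phones[-1] are always in range here, so pyGetD with default "" is exact
def build_diphone_chain (phones : List String) : List String :=
  if phones = [] then []
  else
    let chain := ["#-" ++ PySem.List.pyGetD phones 0 ""]
    let chain := (PySem.List.pyRange 0 ((phones.length : Int) - 1) 1).foldl
      (fun acc i => acc ++ [PySem.List.pyGetD phones i "" ++ "-" ++ PySem.List.pyGetD phones (i + 1) ""]) chain
    chain ++ [PySem.List.pyGetD phones (-1) "" ++ "-#"]

-- ===== PORT B =====
-- the loop over reversed(phones) carries the state (chain, nxt); chain.reverse() at the end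
def build_diphone_chain_alt (phones : List String) : List String :=
  if phones = [] then []
  else
    let st := phones.reverse.foldl
      (fun (st : List String × String) p => (st.1 ++ [p ++ "-" ++ st.2], p)) ([], "#")
    (st.1 ++ ["#-" ++ st.2]).reverse

-- ===== PRECONDITION & SPEC =====
def Spec_build_diphone_chain (phones : List String) (out : List String) : Prop := out = build_diphone_chain_alt phones
instance (phones : List String) (out : List String) : Decidable (Spec_build_diphone_chain phones out) := by unfold Spec_build_diphone_chain; infer_instance

-- ===== CLAIM (what is proved, stated in full; the proofs are below) =====
def Claim_equal_build_diphone_chain : Prop := ∀ (phones : List String), Dom_build_diphone_chain phones → Spec_build_diphone_chain phones (build_diphone_chain phones)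

-- ===== LEMMAS AND PROOFS =====

-- proof-only description of the diphone pairs of l, closing with final phone "-" x
def pairsTo : List String → String → List String
  | [], _ => []
  | p :: t, x => (p ++ "-" ++ t.headD x) :: pairsTo t x

-- B's reversed fold, characterised: the accumulated list reversed is pairsTo, the carried phone is the head
theorem foldRev (l : List String) (x : String) :
    (l.reverse.foldl
        (fun (st : List String × String) p => (st.1 ++ [p ++ "-" ++ st.2], p)) ([], x)).1.reverse
        = pairsTo l x ∧
    (l.reverse.foldl
        (fun (st : List String × String) p => (st.1 ++ [p ++ "-" ++ st.2], p)) ([], x)).2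
        = l.headD x := by
  induction l with
  | nil => simp [pairsTo]
  | cons p t ih =>
    rw [List.reverse_cons, List.foldl_append]
    obtain ⟨h1, h2⟩ := ih
    simp only [List.foldl_cons, List.foldl_nil, List.reverse_append, List.reverse_cons,
      List.reverse_nil, List.nil_append, List.singleton_append, h1, h2, pairsTo,
      List.headD_cons]
    exact ⟨trivial, trivial⟩

-- A's middle loop plus tail append equals pairsTo l "#"
theorem mid_eq (l : List String) (h : l ≠ []) :
    (List.range (l.length - 1)).map
        (fun k => l.getD k "" ++ "-" ++ l.getD (k + 1) "") ++ [l.getLast h ++ "-#"]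
      = pairsTo l "#" := by
  induction l with
  | nil => exact absurd rfl h
  | cons p t ih =>
    cases t with
    | nil => simp [pairsTo, show ("-#" : String) = "-" ++ "#" from rfl, String.append_assoc]
    | cons q r =>
      have hih := ih (by simp)
      simp only [List.length_cons, Nat.add_sub_cancel] at hih
      have hlast : (p :: q :: r).getLast h = (q :: r).getLast (by simp) := by
        simp [List.getLast_cons]
      rw [hlast]
      have hlen : (p :: q :: r).length - 1 = r.length + 1 := by simp
      rw [hlen, List.range_succ_eq_map]
      simp only [List.map_cons, List.map_map]
      rw [show pairsTo (p :: q :: r) "#" = (p ++ "-" ++ q) :: pairsTo (q :: r) "#" from by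
        simp [pairsTo], ← hih]
      simp [Function.comp_def]

theorem build_diphone_chain_spec : Claim_equal_build_diphone_chain := by
  intro phones _
  unfold Spec_build_diphone_chain build_diphone_chain build_diphone_chain_alt
  by_cases hnil : phones = []
  · simp [hnil]
  · simp only [if_neg hnil]
    rw [PySem.List.foldl_append_singleton_eq_map, PySem.List.pyRange_one]
    rw [PySem.List.pyGetD_neg_one _ "" hnil]
    have hz : PySem.List.pyGetD phones 0 "" = phones.getD 0 "" := by
      simpa using PySem.List.pyGetD_natCast phones 0 ""
    obtain ⟨p, t, rfl⟩ := List.exists_cons_of_ne_nil hnil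
    rw [List.map_map]
    have harg : (((p :: t).length : Int) - 1 - 0).toNat = (p :: t).length - 1 := by
      omega
    rw [harg]
    have hfun : ∀ k ∈ List.range ((p :: t).length - 1),
        ((fun i => PySem.List.pyGetD (p :: t) i "" ++ "-" ++ PySem.List.pyGetD (p :: t) (i + 1) "") ∘
          (fun k : ℕ => (0 : Int) + (k : Int))) k
          = (p :: t).getD k "" ++ "-" ++ (p :: t).getD (k + 1) "" := by
      intro k _
      have h1 : ((0 : Int) + (k : Int)) = ((k : Nat) : Int) := by omega
      have h2 : ((k : Int) + 1) = (((k + 1 : Nat)) : Int) := by omega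
      simp only [Function.comp, h1, h2, PySem.List.pyGetD_natCast]
    rw [List.map_congr_left hfun]
    obtain ⟨f1, f2⟩ := foldRev (p :: t) "#"
    rw [List.reverse_append, f1, f2, hz]
    rw [← mid_eq (p :: t) (by simp)]
    simp [List.getD]
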